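-- pv_equiv track=rewrite | github.com/marcomc/Multcloud_remote_upload | MultCloud CLI v5.0.0/scripts/reverse_engineer_api.py | group_endpoints
-- ===== SOURCE A (Python) =====
-- ENDPOINT_GROUPS = {
--     "auth": "/user/",
--     "drives": "/drives/",
--     "files": "/files/",
--     "tasks": "/tasks/",
--     "realtime_sync": "/realtime_sync/",
--     "torrent": "/torrent/",
--     "video_saver": "/video_saver/",
--     "cloud_email": "/cloud_email",
--     "business_transfer": "/business_transfer/",
--     "share": "/share/",
--     "email": "/email/",
--     "subscription": "/subscription/",
--     "notify": "/notify/",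
--     "subaccount": "/subaccount/",
--     "permission": "/permission/",
--     "other": "",
-- }
--
-- def group_endpoints(endpoints: list[str]) -> dict:
--     """Group endpoints by their API category."""
--     grouped = {k: [] for k in ENDPOINT_GROUPS}
--     for ep in endpoints:
--         placed = False
--         for group, prefix in ENDPOINT_GROUPS.items():
--             if group == "other":
--                 continue
--             if ep.startswith(prefix):
--                 grouped[group].append(ep)
--                 placed = True
--                 break
--         if not placed:
--             grouped["other"].append(ep)
--     # Remove empty groups
--     return {k: sorted(v) for k, v in grouped.items() if v}
-- ===== SOURCE B (Python) =====
-- ENDPOINT_GROUPS = {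
--     "auth": "/user/",
--     "drives": "/drives/",
--     "files": "/files/",
--     "tasks": "/tasks/",
--     "realtime_sync": "/realtime_sync/",
--     "torrent": "/torrent/",
--     "video_saver": "/video_saver/",
--     "cloud_email": "/cloud_email",
--     "business_transfer": "/business_transfer/",
--     "share": "/share/",
--     "email": "/email/",
--     "subscription": "/subscription/",
--     "notify": "/notify/",
--     "subaccount": "/subaccount/",
--     "permission": "/permission/",
--     "other": "",
-- }
--
--
-- def group_endpoints(endpoints: list[str]) -> dict:
--     """Group endpoints by their API category (group-major pass over a shrinking pool)."""
--     pool = list(endpoints)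
--     grouped = {}
--     for group, prefix in ENDPOINT_GROUPS.items():
--         if group == "other":
--             continue
--         grouped[group] = [ep for ep in pool if ep.startswith(prefix)]
--         pool = [ep for ep in pool if not ep.startswith(prefix)]
--     grouped["other"] = pool
--     return {k: sorted(v) for k, v in grouped.items() if v}
-- ===== Notes on version B (the rewrite author's own statement) =====
-- stated objective: alternative
-- what changed: Endpoint-major loop with an inner break over groups is inverted into a group-major pass that keeps a shrinking pool of unassigned endpoints, collecting each group's matches from the pool and removing them so first-match priority is preserved; the leftover pool becomes 'other'.
import Mathlib
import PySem

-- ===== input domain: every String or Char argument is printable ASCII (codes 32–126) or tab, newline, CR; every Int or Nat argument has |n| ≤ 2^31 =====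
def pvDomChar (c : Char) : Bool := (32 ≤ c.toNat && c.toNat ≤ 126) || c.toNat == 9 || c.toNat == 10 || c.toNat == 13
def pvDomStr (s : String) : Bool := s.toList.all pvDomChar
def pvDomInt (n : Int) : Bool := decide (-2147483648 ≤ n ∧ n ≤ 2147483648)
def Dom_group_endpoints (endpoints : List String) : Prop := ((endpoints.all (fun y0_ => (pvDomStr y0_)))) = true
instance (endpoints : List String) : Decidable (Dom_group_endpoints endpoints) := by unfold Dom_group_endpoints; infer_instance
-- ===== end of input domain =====

-- B replaces A's endpoint-major loop (inner break over groups) by a group-major pass over a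
-- shrinking pool of unassigned endpoints; same return value, no mutation of the argument.

-- ===== PORT A =====
-- the module constant ENDPOINT_GROUPS (a dict literal; its items in insertion order)
def EG_ITEMS : List (String × String) :=
  [("auth", "/user/"), ("drives", "/drives/"), ("files", "/files/"), ("tasks", "/tasks/"),
   ("realtime_sync", "/realtime_sync/"), ("torrent", "/torrent/"), ("video_saver", "/video_saver/"),
   ("cloud_email", "/cloud_email"), ("business_transfer", "/business_transfer/"), ("share", "/share/"),
   ("email", "/email/"), ("subscription", "/subscription/"), ("notify", "/notify/"),
   ("subaccount", "/subaccount/"), ("permission", "/permission/"), ("other", "")]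

-- A's inner 'for group, prefix in ENDPOINT_GROUPS.items(): … break' with its 'placed' flag:
-- returns the group ep is appended to (none = not placed)
def placeA (ep : String) : List (String × String) → Option String
  | [] => none
  | (g, p) :: rest =>
    if g == "other" then placeA ep rest
    else if PySem.Str.startswith ep p then some g
    else placeA ep rest

-- grouped = {k: [] for k in ENDPOINT_GROUPS}
def aInit : PySem.Dict String (List String) :=
  EG_ITEMS.foldl (fun d kp => d.insert kp.1 ([] : List String)) PySem.Dict.empty

def group_endpoints (endpoints : List String) : List (String × List String) :=
  ((endpoints.foldl (fun d ep =>
      match placeA ep EG_ITEMS with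
      | some g => d.modify g [] (fun v => v ++ [ep])
      | none   => d.modify "other" [] (fun v => v ++ [ep])) aInit).items.filter
    (fun kv => !kv.2.isEmpty)).map (fun kv => (kv.1, PySem.List.sorted kv.2 (fun x => x)))

-- ===== PORT B =====
-- the group-major loop of B: for each non-'other' group take its matches out of the pool;
-- returns (the grouped items built so far, the final pool)
def collectB : List (String × String) → List String → List (String × List String) × List String
  | [], pool => ([], pool)
  | (g, p) :: rest, pool =>
    if g == "other" then collectB rest pool
    else
      let matched := pool.filter (fun ep => PySem.Str.startswith ep p)
      let pool' := pool.filter (fun ep => !PySem.Str.startswith ep p)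
      let r := collectB rest pool'
      ((g, matched) :: r.1, r.2)

def group_endpoints_alt (endpoints : List String) : List (String × List String) :=
  let r := collectB EG_ITEMS endpoints
  (((r.1 ++ [("other", r.2)]).filter (fun kv => !kv.2.isEmpty)).map
    (fun kv => (kv.1, PySem.List.sorted kv.2 (fun x => x))))

-- ===== PRECONDITION & SPEC =====
def Spec_group_endpoints (endpoints : List String) (out : List (String × List String)) : Prop := out = group_endpoints_alt endpoints
instance (endpoints : List String) (out : List (String × List String)) : Decidable (Spec_group_endpoints endpoints out) := by unfold Spec_group_endpoints; infer_instance

-- ===== CLAIM (what is proved, stated in full; the proofs are below) =====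
def Claim_equal_group_endpoints : Prop := ∀ (endpoints : List String), Dom_group_endpoints endpoints → Spec_group_endpoints endpoints (group_endpoints endpoints)

-- ===== LEMMAS AND PROOFS =====

-- the group an endpoint lands in ('other' if unplaced)
def tagF (ep : String) : String := (placeA ep EG_ITEMS).getD "other"

-- the common tail of both ports: drop empty groups, sort each group
def postP (l : List (String × List String)) : List (String × List String) :=
  (l.filter (fun kv => !kv.2.isEmpty)).map (fun kv => (kv.1, PySem.List.sorted kv.2 (fun x => x)))

theorem place_mem {ep : String} {l : List (String × String)} {g : String}
    (h : placeA ep l = some g) : g ∈ l.map Prod.fst := by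
  induction l with
  | nil => simp [placeA] at h
  | cons kp rest ih =>
    obtain ⟨g', p⟩ := kp
    by_cases h1 : g' == "other"
    · simp only [placeA, h1, if_pos] at h
      exact List.mem_cons_of_mem _ (ih h)
    · simp only [placeA, h1, if_neg, Bool.false_eq_true, not_false_iff] at h
      by_cases h2 : PySem.Str.startswith ep p
      · simp only [h2, if_pos, Option.some.injEq] at h
        subst h
        simp
      · simp only [h2, Bool.false_eq_true, if_neg, not_false_iff] at h
        exact List.mem_cons_of_mem _ (ih h)

theorem place_ne_other {ep : String} {l : List (String × String)} {g : String}
    (h : placeA ep l = some g) : g ≠ "other" := by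
  induction l with
  | nil => simp [placeA] at h
  | cons kp rest ih =>
    obtain ⟨g', p⟩ := kp
    by_cases h1 : g' == "other"
    · simp only [placeA, h1, if_pos] at h; exact ih h
    · simp only [placeA, h1, if_neg, Bool.false_eq_true, not_false_iff] at h
      by_cases h2 : PySem.Str.startswith ep p
      · simp only [h2, if_pos, Option.some.injEq] at h
        subst h; simpa using h1
      · simp only [h2, Bool.false_eq_true, if_neg, not_false_iff] at h; exact ih h

theorem tag_mem (ep : String) : tagF ep ∈ EG_ITEMS.map Prod.fst := by
  unfold tagF
  cases h : placeA ep EG_ITEMS with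
  | none => simp only [Option.getD_none]; decide
  | some g => simpa using place_mem h

theorem getD_init_nil : ∀ (l : List (String × String)) (d : PySem.Dict String (List String)),
    (∀ k, d.getD k ([] : List String) = []) →
    ∀ k, (l.foldl (fun d kp => d.insert kp.1 ([] : List String)) d).getD k [] = [] := by
  intro l
  induction l with
  | nil => intro d hd k; exact hd k
  | cons kp rest ih =>
    intro d hd k
    refine ih _ (fun k' => ?_) k
    rw [PySem.Dict.getD_insert]
    split <;> simp [hd]


-- the 15 prefixed groups (EG_ITEMS without its final 'other' entry); proof-side helper
def EG_PREF : List (String × String) :=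
  [("auth", "/user/"), ("drives", "/drives/"), ("files", "/files/"), ("tasks", "/tasks/"),
   ("realtime_sync", "/realtime_sync/"), ("torrent", "/torrent/"), ("video_saver", "/video_saver/"),
   ("cloud_email", "/cloud_email"), ("business_transfer", "/business_transfer/"), ("share", "/share/"),
   ("email", "/email/"), ("subscription", "/subscription/"), ("notify", "/notify/"),
   ("subaccount", "/subaccount/"), ("permission", "/permission/")]

theorem items_final (endpoints : List String) :
    (endpoints.foldl (fun d ep => d.modify (tagF ep) [] (fun v => v ++ [ep])) aInit).items
      = EG_ITEMS.map (fun kp => (kp.1, endpoints.filter (fun ep => tagF ep == kp.1))) := by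
  have hinit_keys : aInit.keys = EG_ITEMS.map Prod.fst := by decide
  have hinit_nodup : aInit.keys.Nodup := by decide
  have hkeys : (endpoints.foldl (fun d ep => d.modify (tagF ep) [] (fun v => v ++ [ep])) aInit).keys
      = aInit.keys := by
    have h1 := PySem.Dict.keys_foldl_modify_key endpoints tagF ([] : List String)
      (fun _ ep v => v ++ [ep]) aInit
    simp only [] at h1
    rw [h1, PySem.Set.update_eq_append_filter]
    have h2 : List.filter (fun y => !(PySem.Set.contains aInit.keys y))
        (PySem.Set.ofList (endpoints.map tagF)) = [] := by
      apply List.filter_eq_nil_iff.mpr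
      intro y hy
      have hy' : y ∈ endpoints.map tagF := (PySem.Set.mem_ofList _ _).mp hy
      obtain ⟨ep, _, rfl⟩ := List.mem_map.mp hy'
      simp
      rw [hinit_keys]
      exact tag_mem ep
    rw [h2, List.append_nil]
  have hnodup : (endpoints.foldl (fun d ep => d.modify (tagF ep) [] (fun v => v ++ [ep])) aInit).keys.Nodup := by
    have h1 := PySem.Dict.nodup_keys_foldl_modify_key endpoints tagF ([] : List String)
      (fun _ ep v => v ++ [ep]) aInit hinit_nodup
    simpa using h1
  have hgetD : ∀ k, (endpoints.foldl (fun d ep => d.modify (tagF ep) [] (fun v => v ++ [ep])) aInit).getD k []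
      = endpoints.filter (fun ep => tagF ep == k) := by
    intro k
    have hz : aInit.getD k [] = [] := by
      unfold aInit
      exact getD_init_nil EG_ITEMS PySem.Dict.empty (fun k' => by simp [PySem.Dict.getD_empty]) k
    have hmap : endpoints.foldl (fun d ep => d.modify (tagF ep) [] (fun v => v ++ [ep])) aInit
        = (endpoints.map (fun ep => (tagF ep, ep))).foldl
            (fun d p => d.modify p.1 [] (fun v => v ++ [p.2])) aInit := by
      rw [List.foldl_map]
    have hproj : ∀ (l : List String),
        List.map (fun x : String × String => x.2)
          (List.filter (fun p : String × String => p.1 == k) (l.map (fun ep => (tagF ep, ep))))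
          = l.filter (fun ep => tagF ep == k) := by
      intro l
      induction l with
      | nil => simp
      | cons a t iht =>
        simp only [List.map_cons, List.filter_cons]
        by_cases h : tagF a == k <;> simp [h, iht]
    rw [hmap, PySem.Dict.getD_foldl_modify_append, hz, List.nil_append]
    exact hproj endpoints
  rw [PySem.Dict.items_eq_map_keys _ hnodup ([] : List String), hkeys, hinit_keys, List.map_map]
  apply List.map_congr_left
  intro kp _
  simp only [Function.comp_apply]
  rw [hgetD]

-- characterisation of A: grouped is the 16 fixed keys, each holding the endpoints tagged with it
theorem A_char (endpoints : List String) :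
    group_endpoints endpoints =
      postP (EG_ITEMS.map (fun kp => (kp.1, endpoints.filter (fun ep => tagF ep == kp.1)))) := by
  have hstep : (fun (d : PySem.Dict String (List String)) ep =>
      match placeA ep EG_ITEMS with
      | some g => d.modify g [] (fun v => v ++ [ep])
      | none   => d.modify "other" [] (fun v => v ++ [ep]))
      = fun d ep => d.modify (tagF ep) [] (fun v => v ++ [ep]) := by
    funext d ep
    unfold tagF
    cases placeA ep EG_ITEMS <;> simp
  unfold group_endpoints postP
  rw [hstep, items_final]

-- characterisation of B's loop over any group list with distinct names
theorem collect_spec : ∀ (gs : List (String × String)) (xs : List String),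
    (gs.map Prod.fst).Nodup →
    collectB gs xs =
      ((gs.filter (fun kp => !(kp.1 == "other"))).map
          (fun kp => (kp.1, xs.filter (fun ep => placeA ep gs == some kp.1))),
       xs.filter (fun ep => (placeA ep gs).isNone)) := by
  intro gs
  induction gs with
  | nil =>
    intro xs _
    simp [collectB, placeA]
  | cons kp rest ih =>
    intro xs hnd
    obtain ⟨g, p⟩ := kp
    simp only [List.map_cons, List.nodup_cons] at hnd
    have hg : g ∉ rest.map Prod.fst := hnd.1
    have hrest := hnd.2
    by_cases h1 : g == "other"
    · simp only [collectB, h1, if_pos]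
      rw [ih xs hrest]
      simp [placeA, h1]
    · simp only [collectB, h1, Bool.false_eq_true, if_neg, not_false_iff, List.filter_cons,
        Bool.not_false, if_pos, List.map_cons]
      rw [ih (xs.filter (fun ep => !PySem.Str.startswith ep p)) hrest]
      simp only [Prod.mk.injEq, List.cons.injEq, true_and]
      refine ⟨⟨?_, ?_⟩, ?_⟩
      · -- head group: matched = xs.filter (placeA over the whole list = some g)
        apply List.filter_congr
        intro ep _
        by_cases hsw : PySem.Chars.startswith ep.toList p.toList = true
        · simp [placeA, h1, hsw]
        · cases hpl : placeA ep rest with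
          | none => simp [placeA, h1, hsw, hpl]
          | some a =>
            have hne : a ≠ g := fun e => hg (e ▸ place_mem hpl)
            simp [placeA, h1, hsw, hpl, hne]
      · -- later groups: pulling matches from the shrunk pool = filtering xs by the whole list
        apply List.map_congr_left
        intro kp' hmem
        have hmem' : kp' ∈ rest := List.mem_of_mem_filter hmem
        have hne' : g ≠ kp'.1 := fun e => hg (e ▸ List.mem_map_of_mem hmem')
        rw [Prod.mk.injEq]
        refine ⟨rfl, ?_⟩
        rw [List.filter_filter]
        apply List.filter_congr
        intro ep _
        by_cases hsw : PySem.Chars.startswith ep.toList p.toList = true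
        · simp [placeA, h1, hsw, hne']
        · simp [placeA, h1, hsw]
      · -- the final pool: the unplaced endpoints
        rw [List.filter_filter]
        apply List.filter_congr
        intro ep _
        by_cases hsw : PySem.Chars.startswith ep.toList p.toList = true
        · simp [placeA, h1, hsw]
        · simp [placeA, h1, hsw]

theorem bridge (endpoints : List String) :
    EG_ITEMS.map (fun kp => (kp.1, endpoints.filter (fun ep => tagF ep == kp.1))) =
      (EG_ITEMS.filter (fun kp => !(kp.1 == "other"))).map
          (fun kp => (kp.1, endpoints.filter (fun ep => placeA ep EG_ITEMS == some kp.1)))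
        ++ [("other", endpoints.filter (fun ep => (placeA ep EG_ITEMS).isNone))] := by
  have hfil : EG_ITEMS.filter (fun kp => !(kp.1 == "other")) = EG_PREF := by decide
  have hsplit : EG_ITEMS = EG_PREF ++ [("other", "")] := by decide
  have hother : ∀ kp ∈ EG_PREF, kp.1 ≠ "other" := by decide
  rw [hfil]
  conv_lhs => rw [hsplit]
  rw [List.map_append]
  congr 1
  · apply List.map_congr_left
    intro kp hkp
    rw [Prod.mk.injEq]
    refine ⟨rfl, ?_⟩
    apply List.filter_congr
    intro ep _
    cases hpl : placeA ep EG_ITEMS with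
    | none =>
      have : ("other" == kp.1) = false := by
        simp
        exact fun e => hother kp hkp e.symm
      simp [tagF, hpl, this]
    | some a => simp [tagF, hpl]
  · simp only [List.map_cons, List.map_nil, List.cons.injEq, and_true]
    rw [Prod.mk.injEq]
    refine ⟨rfl, ?_⟩
    apply List.filter_congr
    intro ep _
    cases hpl : placeA ep EG_ITEMS with
    | none => simp [tagF, hpl]
    | some a =>
      have := place_ne_other hpl
      simp [tagF, hpl, this]

theorem B_char (endpoints : List String) :
    group_endpoints_alt endpoints =
      postP ((EG_ITEMS.filter (fun kp => !(kp.1 == "other"))).map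
          (fun kp => (kp.1, endpoints.filter (fun ep => placeA ep EG_ITEMS == some kp.1)))
        ++ [("other", endpoints.filter (fun ep => (placeA ep EG_ITEMS).isNone))]) := by
  unfold group_endpoints_alt postP
  rw [collect_spec EG_ITEMS endpoints (by decide)]

-- ===== VERDICT (by name: the statement is the Claim_ definition above) =====
theorem group_endpoints_spec : Claim_equal_group_endpoints := by
  intro endpoints _
  unfold Spec_group_endpoints
  rw [A_char, B_char, bridge]
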